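-- pv_equiv track=rewrite | github.com/chaxz93/tezos_blockstars | tezos_blockstars.py | getMaximumOutfits
-- ===== SOURCE A (Python) =====
-- def getMaximumOutfits(outfits, money):
--     outfits_bought = 0
--     for o in outfits:
--         if o < money:
--             money = money - o
--             outfits_bought = outfits_bought + 1
--         elif o == money:
--             outfits_bought = outfits_bought + 1
--             return outfits_bought
--             break
--         else:
--             return outfits_bought
--             break
-- ===== SOURCE B (Python) =====
-- def getMaximumOutfits(outfits, money):
--     # Two passes: build the list of cumulative prefix totals, then scan it
--     # against the fixed original budget (instead of decrementing money).
--     prefix = []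
--     total = 0
--     for o in outfits:
--         total += o
--         prefix.append(total)
--     count = 0
--     for t in prefix:
--         if t >= money:
--             return count + 1 if t == money else count
--         count += 1
--     return count
-- ===== Notes on version B (the rewrite author's own statement) =====
-- stated objective: alternative
-- what changed: B precomputes the list of cumulative prefix totals and then searches it against the fixed original budget, instead of A's single loop that decrements a remaining-money variable in place.
-- outside the precondition, e.g. on getMaximumOutfits([1, 2], 10): A returns None, B returns 2; on getMaximumOutfits([], 5): A returns None, B returns 0
import Mathlib
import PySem

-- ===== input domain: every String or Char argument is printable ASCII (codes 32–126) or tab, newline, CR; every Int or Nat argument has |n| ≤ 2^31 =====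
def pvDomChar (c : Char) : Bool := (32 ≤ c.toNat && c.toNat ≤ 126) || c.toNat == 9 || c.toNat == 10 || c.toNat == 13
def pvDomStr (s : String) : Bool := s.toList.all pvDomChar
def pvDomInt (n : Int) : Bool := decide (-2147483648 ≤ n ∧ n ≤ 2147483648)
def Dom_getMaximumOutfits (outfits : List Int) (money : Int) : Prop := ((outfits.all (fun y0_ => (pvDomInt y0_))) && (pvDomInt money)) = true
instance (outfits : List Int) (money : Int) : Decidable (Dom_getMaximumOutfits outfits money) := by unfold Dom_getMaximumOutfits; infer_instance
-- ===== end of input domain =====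

-- B builds the list of cumulative prefix totals and searches it against the fixed
-- original budget, instead of A's in-place decrement of a remaining-money variable
-- (objective: alternative; same O(n) cost).

-- ===== PORT A =====
-- A's for-loop with early returns; `none` = the Python fall-through (A returns None there,
-- excluded by Pre_ below).
def getMaximumOutfitsLoop (outfits : List Int) (money : Int) (bought : Int) : Option Int :=
  match outfits with
  | [] => none
  | o :: rest =>
    if o < money then getMaximumOutfitsLoop rest (money - o) (bought + 1)
    else if o == money then some (bought + 1)
    else some bought

def getMaximumOutfits (outfits : List Int) (money : Int) : Int :=
  (getMaximumOutfitsLoop outfits money 0).getD 0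

-- ===== PORT B =====
-- first pass of Source B: prefix totals (total starts at 0, appending total+o each step)
def altPrefix (outfits : List Int) (total : Int) : List Int :=
  match outfits with
  | [] => []
  | o :: rest => (total + o) :: altPrefix rest (total + o)

-- second pass of Source B: scan the prefix totals against the fixed budget with a counter
def altScan (pfx : List Int) (money : Int) (count : Int) : Int :=
  match pfx with
  | [] => count
  | t :: rest =>
    if t ≥ money then (if t == money then count + 1 else count)
    else altScan rest money (count + 1)

def getMaximumOutfits_alt (outfits : List Int) (money : Int) : Int :=
  altScan (altPrefix outfits 0) money 0

-- ===== PRECONDITION & SPEC =====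
-- Pre_ excludes exactly the inputs on which Python A falls off the end of its loop and
-- returns None (not an int): inputs where every nonempty prefix total stays below money.
def Pre_getMaximumOutfits (outfits : List Int) (money : Int) : Prop :=
  ∃ n, n < outfits.length ∧ money ≤ (outfits.take (n + 1)).sum
instance (outfits : List Int) (money : Int) : Decidable (Pre_getMaximumOutfits outfits money) := by
  unfold Pre_getMaximumOutfits
  exact decidable_of_iff (∃ n < outfits.length, money ≤ (outfits.take (n + 1)).sum)
    (by constructor <;> (rintro ⟨n, h1, h2⟩; exact ⟨n, h1, h2⟩))

def pvWitness_getMaximumOutfits : List Int × Int := ([2, 3, 4], 7)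

def Spec_getMaximumOutfits (outfits : List Int) (money : Int) (out : Int) : Prop := out = getMaximumOutfits_alt outfits money
instance (outfits : List Int) (money : Int) (out : Int) : Decidable (Spec_getMaximumOutfits outfits money out) := by unfold Spec_getMaximumOutfits; infer_instance

-- ===== CLAIM (what is proved, stated in full; the proofs are below) =====
def Claim_equal_getMaximumOutfits : Prop := ∀ (outfits : List Int) (money : Int), Dom_getMaximumOutfits outfits money → Pre_getMaximumOutfits outfits money → Spec_getMaximumOutfits outfits money (getMaximumOutfits outfits money)

-- ===== LEMMAS AND PROOFS =====

-- B's scan of the prefix totals (translated by `total`) computes A's loop result,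
-- with default `count + length` when the loop falls through.
theorem altScan_eq_loop (outfits : List Int) (money bought total : Int) :
    altScan (altPrefix outfits total) (total + money) bought
      = (getMaximumOutfitsLoop outfits money bought).getD (bought + outfits.length) := by
  induction outfits generalizing money bought total with
  | nil => simp [altPrefix, altScan, getMaximumOutfitsLoop]
  | cons o rest ih =>
    simp only [altPrefix, altScan, getMaximumOutfitsLoop]
    by_cases h1 : o < money
    · have hge : ¬ (total + o ≥ total + money) := by omega
      rw [if_neg hge, if_pos h1]
      have : total + money = (total + o) + (money - o) := by ring
      rw [this, ih (money - o) (bought + 1) (total + o)]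
      simp only [List.length_cons]
      congr 1
      push_cast
      ring
    · have hge : total + o ≥ total + money := by omega
      rw [if_pos hge, if_neg h1]
      by_cases h2 : o = money
      · simp [h2]
      · have : (total + o == total + money) = false := by
          simp; omega
        rw [this]
        have : (o == money) = false := by simp [h2]
        simp [this]

-- Under Pre_, A's loop returns `some`.
theorem loop_isSome (outfits : List Int) (money bought : Int)
    (h : ∃ n, n < outfits.length ∧ money ≤ (outfits.take (n + 1)).sum) :
    (getMaximumOutfitsLoop outfits money bought).isSome := by
  induction outfits generalizing money bought with
  | nil => simp at h
  | cons o rest ih =>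
    simp only [getMaximumOutfitsLoop]
    by_cases h1 : o < money
    · rw [if_pos h1]
      apply ih
      obtain ⟨n, hn, hs⟩ := h
      match n with
      | 0 => simp [List.take] at hs; omega
      | Nat.succ k =>
        refine ⟨k, ?_, ?_⟩
        · simpa using hn
        · simp [List.take_succ_cons, List.sum_cons] at hs
          omega
    · rw [if_neg h1]
      by_cases h2 : o == money <;> simp [h2]

-- ===== VERDICT (by name: the statement is the Claim_ definition above) =====
theorem getMaximumOutfits_spec : Claim_equal_getMaximumOutfits := by
  intro outfits money _ hpre
  unfold Spec_getMaximumOutfits getMaximumOutfits getMaximumOutfits_alt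
  have h1 := altScan_eq_loop outfits money 0 0
  rw [zero_add] at h1
  rw [h1]
  have h2 := loop_isSome outfits money 0 hpre
  obtain ⟨r, hr⟩ := Option.isSome_iff_exists.mp h2
  rw [hr]
  rfl
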